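-- pv_equiv track=rewrite | github.com/mmaitland300/organizer_project | organizer/tag_utils.py | parse_multi_dim_tags
-- ===== SOURCE A (Python) =====
-- def parse_multi_dim_tags(tag_string: str) -> dict:
--     """
--     Parse an input string into a dictionary of tags.
--     Tags with a colon are split into dimension and value;
--     tokens without a colon are stored under the "general" dimension.
--     Supports delimiters: comma and semicolon.
--
--     Args:
--         tag_string (str): Input string containing tags
--
--     Returns:
--         dict: Dictionary of tag dimensions and their values
--
--     Raises:
--         ValueError: If tag_string contains invalid format
--     """
--     if not isinstance(tag_string, str):
--         raise ValueError("Tag string must be a string type")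
--
--     delimiters = [",", ";"]
--     tokens = []
--
--     try:
--         for delimiter in delimiters:
--             if delimiter in tag_string:
--                 tokens = [tok.strip() for tok in tag_string.split(delimiter) if tok.strip()]
--                 break
--         if not tokens:
--             tokens = [tag_string.strip()] if tag_string.strip() else []
--
--         tag_dict = {}
--         for token in tokens:
--             if ":" in token:
--                 dimension, tag = token.split(":", 1)
--                 dimension = dimension.strip().lower()
--                 if not dimension:
--                     raise ValueError(f"Empty dimension in token: {token}")
--                 tag = tag.strip().upper()
--                 if not tag:
--                     raise ValueError(f"Empty tag value in token: {token}")
--                 tag_dict.setdefault(dimension, [])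
--                 if tag not in tag_dict[dimension]:
--                     tag_dict[dimension].append(tag)
--             else:
--                 tag_dict.setdefault("general", [])
--                 token_upper = token.strip().upper()
--                 if token_upper and token_upper not in tag_dict["general"]:
--                     tag_dict["general"].append(token_upper)
--         return tag_dict
--
--     except Exception as e:
--         raise ValueError(f"Error parsing tag string: {str(e)}")
-- ===== SOURCE B (Python) =====
-- def parse_multi_dim_tags(tag_string: str) -> dict:
--     """Two-pass re-implementation: collect (dimension, value) pairs in token
--     order (raising the same wrapped ValueErrors), then group/dedup per
--     dimension in a second pass."""
--     if not isinstance(tag_string, str):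
--         raise ValueError("Tag string must be a string type")
--     try:
--         # phase 1: tokenize, then flatten every token to a (dimension, value) pair
--         tokens = []
--         for delimiter in (",", ";"):
--             if delimiter in tag_string:
--                 tokens = [tok.strip() for tok in tag_string.split(delimiter) if tok.strip()]
--                 break
--         if not tokens:
--             tokens = [tag_string.strip()] if tag_string.strip() else []
--         pairs = []
--         for token in tokens:
--             if ":" in token:
--                 dimension, _, tag = token.partition(":")
--                 dimension = dimension.strip().lower()
--                 if not dimension:
--                     raise ValueError(f"Empty dimension in token: {token}")
--                 tag = tag.strip().upper()
--                 if not tag: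
--                     raise ValueError(f"Empty tag value in token: {token}")
--                 pairs.append((dimension, tag))
--             else:
--                 pairs.append(("general", token.strip().upper()))
--         # phase 2: group pairs by dimension, deduplicating while keeping first-seen order
--         result = {}
--         for dimension, _ in pairs:
--             if dimension not in result:
--                 result[dimension] = list(dict.fromkeys(v for d, v in pairs if d == dimension))
--         return result
--     except Exception as e:
--         raise ValueError(f"Error parsing tag string: {str(e)}")
-- ===== Notes on version B (the rewrite author's own statement) =====
-- stated objective: alternative
-- what changed: A parses and mutates the result dict in one interleaved loop (setdefault + membership test + append per token); B makes two passes: first collect a flat list of (dimension, value) pairs in token order (raising the same ValueErrors), then group and deduplicate each dimension's values with dict.fromkeys.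
-- outside the precondition, e.g. on parse_multi_dim_tags(':'): A raises ValueError, B raises ValueError
import Mathlib
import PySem

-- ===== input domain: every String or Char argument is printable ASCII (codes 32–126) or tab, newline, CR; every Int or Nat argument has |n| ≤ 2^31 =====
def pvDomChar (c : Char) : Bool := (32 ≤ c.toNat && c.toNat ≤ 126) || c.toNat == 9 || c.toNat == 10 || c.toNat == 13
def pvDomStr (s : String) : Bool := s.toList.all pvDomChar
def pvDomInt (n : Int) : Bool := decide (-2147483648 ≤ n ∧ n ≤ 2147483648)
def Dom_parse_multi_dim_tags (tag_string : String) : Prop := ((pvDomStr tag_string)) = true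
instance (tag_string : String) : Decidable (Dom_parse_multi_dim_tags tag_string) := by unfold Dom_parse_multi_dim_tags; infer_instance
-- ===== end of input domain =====

-- B re-implements A's single interleaved parse+dict-mutation loop as two passes (collect
-- (dimension, value) pairs, then group/dedup per dimension); equal return value on Pre_.

-- Tokenization helper: Source A and Source B contain this identical delimiter loop verbatim
-- ('for delimiter in [",", ";"]: if delimiter in tag_string: tokens = [...]; break' plus
-- the 'if not tokens' fallback), so both ports share this one transliteration of it.
def pvTokenize (tag_string : String) : List String :=
  let toks :=
    if PySem.Str.isIn "," tag_string then
      (((PySem.Str.split? tag_string ",").getD []).filter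
          (fun t => PySem.Str.strip t ≠ "")).map PySem.Str.strip
    else if PySem.Str.isIn ";" tag_string then
      (((PySem.Str.split? tag_string ";").getD []).filter
          (fun t => PySem.Str.strip t ≠ "")).map PySem.Str.strip
    else []
  if toks = [] then
    (if PySem.Str.strip tag_string ≠ "" then [PySem.Str.strip tag_string] else [])
  else toks

-- ===== PORT A =====
-- A's loop body: one token updates the dict (setdefault + membership test + append).
-- Where Python raises ValueError (empty dimension / empty tag value) the port leaves the
-- dict unchanged; those inputs are excluded by Pre_.
def pvAStep (d : PySem.Dict String (List String)) (token : String) :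
    PySem.Dict String (List String) :=
  if PySem.Str.isIn ":" token then
    -- dimension, tag = token.split(":", 1)  (":" occurs in token, so exactly two parts)
    let parts := (PySem.Str.splitMax? token ":" 1).getD []
    let dimension := PySem.Str.lower (PySem.Str.strip (parts.getD 0 ""))
    if dimension = "" then d  -- Python: raise ValueError (outside Pre_)
    else
      let tag := PySem.Str.upper (PySem.Str.strip (parts.getD 1 ""))
      if tag = "" then d      -- Python: raise ValueError (outside Pre_)
      else
        let d1 := d.setdefault dimension []
        if tag ∈ d1.getD dimension [] then d1
        else d1.insert dimension (d1.getD dimension [] ++ [tag])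
  else
    let d1 := d.setdefault "general" []
    let token_upper := PySem.Str.upper (PySem.Str.strip token)
    if token_upper ≠ "" ∧ token_upper ∉ d1.getD "general" [] then
      d1.insert "general" (d1.getD "general" [] ++ [token_upper])
    else d1

def parse_multi_dim_tags (tag_string : String) : List (String × List String) :=
  ((pvTokenize tag_string).foldl pvAStep (⟨[]⟩ : PySem.Dict String (List String))).items

-- ===== PORT B =====
-- Source B phase 1: flatten one token to its (dimension, value) pair (Source B raises the same
-- ValueErrors as Source A there, in token order; those inputs are excluded by Pre_).
def pvPair (token : String) : String × String :=
  if PySem.Str.isIn ":" token then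
    let parts := (PySem.Str.splitMax? token ":" 1).getD []
    (PySem.Str.lower (PySem.Str.strip (parts.getD 0 "")),
     PySem.Str.upper (PySem.Str.strip (parts.getD 1 "")))
  else ("general", PySem.Str.upper (PySem.Str.strip token))

def parse_multi_dim_tags_alt (tag_string : String) : List (String × List String) :=
  -- phase 1: pairs = []; for token in tokens: pairs.append(...)
  let pairs := (pvTokenize tag_string).foldl (fun ps t => ps ++ [pvPair t]) []
  -- phase 2: group by dimension, dedup with dict.fromkeys, first-seen key order
  (pairs.foldl
    (fun (r : PySem.Dict String (List String)) p =>
      if r.contains p.1 then r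
      else r.insert p.1
        (PySem.List.dedup ((pairs.filter (fun q => q.1 == p.1)).map (fun q => q.2))))
    (⟨[]⟩ : PySem.Dict String (List String))).items

-- ===== PRECONDITION & SPEC =====
-- Pre_ excludes exactly the inputs on which A raises ValueError: a token containing ':'
-- whose part before the first ':' or after it is empty after stripping (B raises there too).
def Pre_parse_multi_dim_tags (tag_string : String) : Prop :=
  ∀ t ∈ pvTokenize tag_string, PySem.Str.isIn ":" t = true →
    PySem.Str.strip (((PySem.Str.splitMax? t ":" 1).getD []).getD 0 "") ≠ "" ∧
    PySem.Str.strip (((PySem.Str.splitMax? t ":" 1).getD []).getD 1 "") ≠ ""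
instance (tag_string : String) : Decidable (Pre_parse_multi_dim_tags tag_string) := by
  unfold Pre_parse_multi_dim_tags; infer_instance

def pvWitness_parse_multi_dim_tags : String := "genre: rock, mood:calm; rock"

def Spec_parse_multi_dim_tags (tag_string : String) (out : List (String × List String)) : Prop :=
  out = parse_multi_dim_tags_alt tag_string
instance (tag_string : String) (out : List (String × List String)) :
    Decidable (Spec_parse_multi_dim_tags tag_string out) := by
  unfold Spec_parse_multi_dim_tags; infer_instance

-- ===== CLAIM (what is proved, stated in full; the proofs are below) =====
def Claim_equal_parse_multi_dim_tags : Prop :=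
  ∀ (tag_string : String), Dom_parse_multi_dim_tags tag_string →
    Pre_parse_multi_dim_tags tag_string →
    Spec_parse_multi_dim_tags tag_string (parse_multi_dim_tags tag_string)

-- ===== LEMMAS AND PROOFS =====

-- the values a dimension collects, and the closed form both folds reach
def pvG (ps : List (String × String)) (k : String) : List String :=
  PySem.List.dedup ((ps.filter (fun q => q.1 == k)).map (fun q => q.2))

def pvF (ps : List (String × String)) : List (String × List String) :=
  (PySem.List.dedup (ps.map (fun p => p.1))).map (fun k => (k, pvG ps k))

-- A's loop body rephrased on a ready-made pair
def pvStepP (d : PySem.Dict String (List String)) (p : String × String) :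
    PySem.Dict String (List String) :=
  let d1 := d.setdefault p.1 []
  if p.2 ∈ d1.getD p.1 [] then d1
  else d1.insert p.1 (d1.getD p.1 [] ++ [p.2])

theorem dw_cons_self (p : Char → Bool) (x : Char) (xs : List Char)
    (h : List.dropWhile p (x :: xs) = x :: xs) : p x = false := by
  by_contra hx
  simp only [Bool.not_eq_false] at hx
  rw [List.dropWhile_cons_of_pos hx] at h
  have := List.length_dropWhile_le p xs
  have := congrArg List.length h
  simp at this; omega

theorem dw_prefix (p : Char → Bool) (l l' : List Char) (hl : List.dropWhile p l = l)
    (hp : l' <+: l) : List.dropWhile p l' = l' := by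
  cases l' with
  | nil => simp
  | cons x t =>
    cases l with
    | nil => simp at hp
    | cons y s =>
      obtain ⟨r, hr⟩ := hp
      have hxy : x = y := by cases hr; rfl
      have := dw_cons_self p y s hl
      rw [List.dropWhile_cons_of_neg (by simp [hxy, this])]

theorem pv_strip_idem (u : List Char) :
    PySem.Chars.strip (PySem.Chars.strip u) = PySem.Chars.strip u := by
  unfold PySem.Chars.strip PySem.Chars.rstrip PySem.Chars.lstrip
  set p := PySem.Chars.isspace
  set a := List.dropWhile p u with ha
  have hla : List.dropWhile p a = a := by rw [ha, List.dropWhile_idempotent]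
  set b := (List.dropWhile p a.reverse).reverse with hb
  have hpre : b <+: a := by
    have := List.reverse_prefix.mpr (List.dropWhile_suffix p (l := a.reverse))
    rwa [List.reverse_reverse] at this
  have h1 : List.dropWhile p b = b := dw_prefix p a b hla hpre
  rw [h1, hb, List.reverse_reverse, List.dropWhile_idempotent]

theorem pv_str_strip_idem (u : String) :
    PySem.Str.strip (PySem.Str.strip u) = PySem.Str.strip u := by
  show String.ofList _ = _
  rw [PySem.Str.toList_strip, pv_strip_idem]
  rfl

theorem pv_lower_ne (x : String) (h : x ≠ "") : PySem.Str.lower x ≠ "" := by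
  intro hc
  apply h
  have h2 : (PySem.Str.lower x).toList = [] := by rw [hc]; rfl
  rw [PySem.Str.toList_lower] at h2
  unfold PySem.Chars.lower at h2
  rw [List.map_eq_nil_iff] at h2
  exact String.toList_eq_nil_iff.mp h2

theorem pv_upper_ne (x : String) (h : x ≠ "") : PySem.Str.upper x ≠ "" := by
  intro hc
  apply h
  have h2 : (PySem.Str.upper x).toList = [] := by rw [hc]; rfl
  rw [PySem.Str.toList_upper] at h2
  unfold PySem.Chars.upper at h2
  rw [List.map_eq_nil_iff] at h2
  exact String.toList_eq_nil_iff.mp h2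

theorem pv_upper_strip_ne (t : String) (h1 : PySem.Str.strip t = t) (h2 : t ≠ "") :
    PySem.Str.upper (PySem.Str.strip t) ≠ "" := by
  intro hc
  apply h2
  have h3 : (PySem.Str.upper (PySem.Str.strip t)).toList = [] := by rw [hc]; rfl
  rw [PySem.Str.toList_upper] at h3
  unfold PySem.Chars.upper at h3
  rw [List.map_eq_nil_iff, PySem.Str.toList_strip] at h3
  have h4 : (PySem.Str.strip t).toList = [] := by rw [PySem.Str.toList_strip]; exact h3
  exact h1.symm.trans (String.toList_eq_nil_iff.mp h4)

theorem pv_tokens_fact (s : String) :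
    ∀ t ∈ pvTokenize s, PySem.Str.strip t = t ∧ t ≠ "" := by
  intro t ht
  unfold pvTokenize at ht
  simp only at ht
  have hmap : ∀ (l : List String),
      t ∈ (l.filter (fun u => PySem.Str.strip u ≠ "")).map PySem.Str.strip →
      PySem.Str.strip t = t ∧ t ≠ "" := by
    intro l hm
    rw [List.mem_map] at hm
    obtain ⟨u, hu, rfl⟩ := hm
    rw [List.mem_filter] at hu
    have hne : PySem.Str.strip u ≠ "" := by simpa using hu.2
    exact ⟨pv_str_strip_idem u, hne⟩
  split_ifs at ht
  all_goals first
    | exact hmap _ ht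
    | (rw [List.mem_singleton] at ht; subst ht; exact ⟨pv_str_strip_idem s, by assumption⟩)
    | simp at ht

theorem pv_dedup_snoc {α : Type} [BEq α] [LawfulBEq α] (xs : List α) (x : α) :
    PySem.List.dedup (xs ++ [x]) =
      if x ∈ xs then PySem.List.dedup xs else PySem.List.dedup xs ++ [x] := by
  simp only [PySem.List.dedup_eq_ofList, PySem.Set.ofList, List.foldl_append, List.foldl_cons,
    List.foldl_nil, PySem.Set.add]
  have hmem : (List.foldl PySem.Set.add PySem.Set.empty xs).contains x = decide (x ∈ xs) := by
    have := PySem.List.mem_dedup xs x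
    rw [PySem.List.dedup_eq_ofList, PySem.Set.ofList] at this
    by_cases h : x ∈ xs
    · simp [h]; exact this.mpr h
    · simp [h]; exact fun hc => h (this.mp hc)
  rw [hmem]
  by_cases h : x ∈ xs <;> simp [h]

theorem pv_find?_map_keyfun (keys : List String) (g : String → List String) (k : String)
    (h : k ∈ keys) :
    List.find? (fun p => p.1 == k) (keys.map (fun k' => (k', g k'))) = some (k, g k) := by
  induction keys with
  | nil => simp at h
  | cons a l ih =>
    simp only [List.map_cons, List.find?_cons]
    by_cases hek : a == k
    · simp only [hek]
      have : a = k := by exact beq_iff_eq.mp hek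
      subst this; rfl
    · simp only [hek]
      rcases List.mem_cons.mp h with h1 | h2
      · exact absurd (beq_iff_eq.mpr h1.symm) (by simpa using hek)
      · simpa using ih h2

theorem pv_contains_pvF (ps : List (String × String)) (k : String) :
    (PySem.Dict.mk (pvF ps) : PySem.Dict String (List String)).contains k
      = decide (k ∈ ps.map (fun p => p.1)) := by
  by_cases h : k ∈ ps.map (fun p => p.1)
  · simp only [h, decide_true, PySem.Dict.contains, pvF]
    rw [List.any_eq_true]
    exact ⟨(k, pvG ps k), List.mem_map.mpr ⟨k, (PySem.List.mem_dedup _ _).mpr h, rfl⟩, by simp⟩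
  · simp only [h, decide_false, PySem.Dict.contains, pvF]
    rw [List.any_eq_false]
    rintro ⟨k', v'⟩ hm
    rw [List.mem_map] at hm
    obtain ⟨k'', hk'', heq⟩ := hm
    have hk : k'' = k' := congrArg Prod.fst heq
    subst hk
    have hmem : k'' ∈ ps.map (fun p => p.1) := (PySem.List.mem_dedup _ _).mp hk''
    simp only [beq_iff_eq]
    intro hc; exact h (hc ▸ hmem)

theorem pv_getD_pvF (ps : List (String × String)) (k : String)
    (h : k ∈ ps.map (fun p => p.1)) :
    (PySem.Dict.mk (pvF ps) : PySem.Dict String (List String)).getD k [] = pvG ps k := by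
  simp only [PySem.Dict.getD, PySem.Dict.get?, pvF]
  rw [pv_find?_map_keyfun _ _ _ ((PySem.List.mem_dedup _ _).mpr h)]
  rfl

theorem pv_pvG_snoc (ps : List (String × String)) (p : String × String) (k' : String) :
    pvG (ps ++ [p]) k' =
      if p.1 = k' then
        (if p.2 ∈ (ps.filter (fun q => q.1 == k')).map (fun q => q.2) then pvG ps k'
         else pvG ps k' ++ [p.2])
      else pvG ps k' := by
  unfold pvG
  rw [List.filter_append]
  by_cases h : p.1 = k'
  · simp only [h, List.filter_cons, beq_self_eq_true, if_true]
    simp only [List.filter_nil, List.map_append, List.map_cons, List.map_nil]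
    rw [pv_dedup_snoc]
  · have hne : (p.1 == k') = false := by simpa using h
    simp [hne, h]

theorem pvA_closed (ps : List (String × String)) :
    (ps.foldl pvStepP (⟨[]⟩ : PySem.Dict String (List String))).items = pvF ps := by
  induction ps using List.reverseRecOn with
  | nil => simp [pvF, pvG, PySem.List.dedup, PySem.Set.ofList]
  | append_singleton ps p ih =>
    rw [List.foldl_append, List.foldl_cons, List.foldl_nil]
    -- the dict reached so far is exactly ⟨pvF ps⟩
    have hd : (ps.foldl pvStepP (⟨[]⟩ : PySem.Dict String (List String))) = ⟨pvF ps⟩ := by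
      cases hrec : (ps.foldl pvStepP (⟨[]⟩ : PySem.Dict String (List String))) with
      | mk items => rw [hrec] at ih; simp at ih; rw [ih]
    rw [hd]
    obtain ⟨k, v⟩ := p
    unfold pvStepP
    simp only
    by_cases hk : k ∈ ps.map (fun p => p.1)
    · -- key already present: setdefault is a no-op
      have hsd : (PySem.Dict.mk (pvF ps) : PySem.Dict String (List String)).setdefault k [] =
          ⟨pvF ps⟩ := by
        unfold PySem.Dict.setdefault
        rw [pv_contains_pvF]
        simp [hk]
      rw [hsd, pv_getD_pvF ps k hk]
      by_cases hv : v ∈ pvG ps k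
      · rw [if_pos hv]
        -- pvF unchanged
        have h1 : PySem.List.dedup ((ps ++ [(k, v)]).map (fun p => p.1)) =
            PySem.List.dedup (ps.map (fun p => p.1)) := by
          rw [List.map_append, List.map_cons, List.map_nil, pv_dedup_snoc, if_pos hk]
        unfold pvF
        rw [h1]
        apply List.map_congr_left
        intro k' hk'
        rw [pv_pvG_snoc]
        by_cases he : k = k'
        · subst he
          rw [if_pos rfl, if_pos ((PySem.List.mem_dedup _ _).mp hv)]
        · rw [if_neg he]
      · rw [if_neg hv]
        -- insert on an existing key: in-place replacement
        have hins : (PySem.Dict.mk (pvF ps) : PySem.Dict String (List String)).insert k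
            (pvG ps k ++ [v]) = ⟨(pvF ps).map
              (fun q => if q.1 == k then (k, pvG ps k ++ [v]) else q)⟩ := by
          unfold PySem.Dict.insert
          rw [pv_contains_pvF]
          simp [hk]
        rw [hins]
        simp only
        unfold pvF
        have h1 : PySem.List.dedup ((ps ++ [(k, v)]).map (fun p => p.1)) =
            PySem.List.dedup (ps.map (fun p => p.1)) := by
          rw [List.map_append, List.map_cons, List.map_nil, pv_dedup_snoc, if_pos hk]
        rw [h1, List.map_map]
        apply List.map_congr_left
        intro k' hk'
        simp only [Function.comp]
        rw [pv_pvG_snoc]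
        by_cases he : k = k'
        · subst he
          have : v ∉ (ps.filter (fun q => q.1 == k)).map (fun q => q.2) := by
            intro hc; exact hv ((PySem.List.mem_dedup _ _).mpr hc)
          simp only [beq_self_eq_true, if_true, if_neg this]
        · have hne : (k' == k) = false := by simpa using (Ne.symm he)
          simp [hne, he]
    · -- fresh key: setdefault appends (k, []), then insert replaces it by (k, [v])
      have hsd : (PySem.Dict.mk (pvF ps) : PySem.Dict String (List String)).setdefault k [] =
          ⟨pvF ps ++ [(k, [])]⟩ := by
        unfold PySem.Dict.setdefault
        rw [pv_contains_pvF]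
        simp [hk]
      rw [hsd]
      have hget : (PySem.Dict.mk (pvF ps ++ [(k, [])]) :
          PySem.Dict String (List String)).getD k [] = [] := by
        simp only [PySem.Dict.getD, PySem.Dict.get?, List.find?_append]
        have hnone : List.find? (fun p => p.1 == k) (pvF ps) = none := by
          rw [List.find?_eq_none]
          rintro ⟨k', v'⟩ hm
          unfold pvF at hm
          rw [List.mem_map] at hm
          obtain ⟨k'', hk'', heq⟩ := hm
          have hfst : k'' = k' := congrArg Prod.fst heq
          subst hfst
          have : k'' ∈ ps.map (fun p => p.1) := (PySem.List.mem_dedup _ _).mp hk''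
          simp only [beq_iff_eq]
          intro hc; exact hk (hc ▸ this)
        rw [hnone]
        simp
      rw [hget]
      simp only [List.not_mem_nil, if_false, List.nil_append]
      have hcont2 : (PySem.Dict.mk (pvF ps ++ [(k, [])]) :
          PySem.Dict String (List String)).contains k = true := by
        simp [PySem.Dict.contains]
      unfold PySem.Dict.insert
      rw [hcont2]
      simp only [if_true, List.map_append]
      unfold pvF
      conv_rhs => rw [List.map_append, List.map_cons, List.map_nil, pv_dedup_snoc, if_neg hk,
        List.map_append]
      have hfil : (ps.filter (fun q => q.1 == k)) = [] := by
        rw [List.filter_eq_nil_iff]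
        rintro ⟨k', v'⟩ hm
        simp only [beq_iff_eq]
        intro hc
        exact hk (List.mem_map.mpr ⟨(k', v'), hm, hc⟩)
      congr 1
      · rw [List.map_map]
        apply List.map_congr_left
        intro k' hk'
        have hk'mem : k' ∈ ps.map (fun p => p.1) := (PySem.List.mem_dedup _ _).mp hk'
        have hne : k' ≠ k := fun hc => hk (hc ▸ hk'mem)
        have hbe : (k' == k) = false := by simpa using hne
        simp only [Function.comp, hbe, Bool.false_eq_true, if_false]
        rw [pv_pvG_snoc, if_neg (Ne.symm hne)]
      · simp only [List.map_cons, List.map_nil, beq_self_eq_true, if_true]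
        rw [pv_pvG_snoc, if_pos rfl]
        simp [hfil, pvG, PySem.List.dedup, PySem.Set.ofList]

def pvDD (seen : List String) : List String → List String
  | [] => []
  | k :: ks => if seen.contains k then pvDD seen ks else k :: pvDD (seen ++ [k]) ks

theorem pv_dict_contains_eq (d : PySem.Dict String (List String)) (k : String) :
    d.contains k = (d.items.map (fun q => q.1)).contains k := by
  by_cases h : k ∈ d.items.map (fun q => q.1)
  · have : d.contains k = true := by
      rw [List.mem_map] at h
      obtain ⟨q, hq, hfst⟩ := h
      simp only [PySem.Dict.contains, List.any_eq_true]
      exact ⟨q, hq, by simp [hfst]⟩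
    rw [this, (List.contains_iff_mem).mpr h]
  · have : d.contains k = false := by
      simp only [PySem.Dict.contains, List.any_eq_false]
      rintro q hq
      simp only [beq_iff_eq]
      intro hc
      exact h (List.mem_map.mpr ⟨q, hq, hc⟩)
    rw [this]
    symm
    rw [← Bool.not_eq_true, List.contains_iff_mem]
    exact h

theorem pv_foldl_add (ys : List String) : ∀ (s : List String),
    List.foldl PySem.Set.add s ys = s ++ pvDD s ys := by
  induction ys with
  | nil => intro s; simp [pvDD]
  | cons y ys ih =>
    intro s
    rw [List.foldl_cons]
    by_cases h : s.contains y
    · have hadd : PySem.Set.add s y = s := by simp [PySem.Set.add, List.contains_iff_mem.mp h]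
      rw [hadd, ih s, pvDD, if_pos h]
    · have hadd : PySem.Set.add s y = s ++ [y] := by
        have hy : y ∉ s := fun hc => h (List.contains_iff_mem.mpr hc)
        simp [PySem.Set.add, hy]
      rw [hadd, ih (s ++ [y]), pvDD, if_neg h, List.append_assoc]
      rfl

theorem pv_dedup_eq_pvDD (ys : List String) : PySem.List.dedup ys = pvDD [] ys := by
  rw [PySem.List.dedup_eq_ofList, PySem.Set.ofList]
  have := pv_foldl_add ys []
  simpa using this

theorem pvB_gen (G : String → List String) (l : List (String × String)) :
    ∀ (d : PySem.Dict String (List String)),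
    (l.foldl (fun r p => if r.contains p.1 then r else r.insert p.1 (G p.1)) d).items
      = d.items ++ (pvDD (d.items.map (fun q => q.1)) (l.map (fun p => p.1))).map
          (fun k => (k, G k)) := by
  induction l with
  | nil => intro d; simp [pvDD]
  | cons p l ih =>
    intro d
    rw [List.foldl_cons, List.map_cons]
    by_cases h : d.contains p.1 = true
    · rw [if_pos h, ih d, pvDD,
        if_pos (by rw [← pv_dict_contains_eq]; exact h)]
    · rw [if_neg h]
      have hins : d.insert p.1 (G p.1) = ⟨d.items ++ [(p.1, G p.1)]⟩ := by
        unfold PySem.Dict.insert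
        rw [Bool.of_not_eq_true h]
        simp
      rw [hins, ih]
      simp only [List.map_append, List.map_cons, List.map_nil]
      rw [pvDD, if_neg (by rw [← pv_dict_contains_eq]; exact h)]
      simp [List.append_assoc]

theorem pvB_closed (ps : List (String × String)) :
    (ps.foldl
      (fun r p =>
        if r.contains p.1 then r
        else r.insert p.1
          (PySem.List.dedup ((ps.filter (fun q => q.1 == p.1)).map (fun q => q.2))))
      (⟨[]⟩ : PySem.Dict String (List String))).items = pvF ps := by
  have := pvB_gen (fun k => PySem.List.dedup ((ps.filter (fun q => q.1 == k)).map (fun q => q.2)))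
    ps ⟨[]⟩
  simp only [List.nil_append] at this
  rw [this]
  unfold pvF
  rw [pv_dedup_eq_pvDD]
  rfl

theorem pvA_step_pair (s : String) (hpre : Pre_parse_multi_dim_tags s)
    (d : PySem.Dict String (List String)) (t : String) (ht : t ∈ pvTokenize s) :
    pvAStep d t = pvStepP d (pvPair t) := by
  obtain ⟨hstrip, hne⟩ := pv_tokens_fact s t ht
  by_cases hc : PySem.Str.isIn ":" t = true
  · obtain ⟨hd1, hd2⟩ := hpre t ht hc
    unfold pvAStep pvPair pvStepP
    simp only [hc, if_true]
    rw [if_neg (pv_lower_ne _ hd1), if_neg (pv_upper_ne _ hd2)]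
  · have hcf : PySem.Str.isIn ":" t = false := by simpa using hc
    have htu : PySem.Str.upper (PySem.Str.strip t) ≠ "" := pv_upper_strip_ne t hstrip hne
    unfold pvAStep pvPair pvStepP
    simp only [hcf, Bool.false_eq_true, if_false]
    by_cases hm : (PySem.Str.upper (PySem.Str.strip t))
        ∈ (d.setdefault "general" []).getD "general" []
    · rw [if_neg (by intro hand; exact hand.2 hm), if_pos hm]
    · rw [if_pos ⟨htu, hm⟩, if_neg hm]

-- ===== VERDICT (by name: the statement is the Claim_ definition above) =====
theorem parse_multi_dim_tags_spec : Claim_equal_parse_multi_dim_tags := by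
  intro s _hdom hpre
  unfold Spec_parse_multi_dim_tags parse_multi_dim_tags parse_multi_dim_tags_alt
  rw [PySem.List.foldl_congr_mem (pvTokenize s) pvAStep
        (fun d t => pvStepP d (pvPair t)) ⟨[]⟩
        (fun d t ht => pvA_step_pair s hpre d t ht)]
  rw [PySem.List.foldl_append_singleton_eq_map pvPair (pvTokenize s) []]
  rw [show (List.foldl (fun d t => pvStepP d (pvPair t)) (⟨[]⟩ : PySem.Dict String (List String)) (pvTokenize s))
        = List.foldl pvStepP ⟨[]⟩ ((pvTokenize s).map pvPair) from (List.foldl_map).symm]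
  rw [pvA_closed, List.nil_append, pvB_closed]
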